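-- pv_equiv track=rewrite | github.com/kerdemdemir/SnakeBot | DynamicTuner.py | MergeTransactions
-- ===== SOURCE A (Python) =====
-- smallestTime = 500
--
-- startTime = 0
--
-- listCount = 4
--
-- def MergeTransactions ( transactionList, msec, transactionBinCount ):
--     index = (msec - startTime) // smallestTime
--     totalElement = index * transactionBinCount * listCount
--     if totalElement >= len(transactionList):
--         return []
--     arrayList = transactionList[-totalElement:]
--     mergeArray = []
--     for i in range(transactionBinCount):
--         curStartIndex = i * listCount * index
--         for j in range(listCount):
--             mergeArray.append(0)
--             for k in range(index):
--                 mergeArray[-1] += arrayList[curStartIndex + j + k * listCount]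
--
--     return mergeArray
-- ===== SOURCE B (Python) =====
-- smallestTime = 500
--
-- startTime = 0
--
-- listCount = 4
--
-- def MergeTransactions(transactionList, msec, transactionBinCount):
--     index = (msec - startTime) // smallestTime
--     totalElement = index * transactionBinCount * listCount
--     if totalElement >= len(transactionList):
--         return []
--     arrayList = transactionList[-totalElement:]
--     mergeArray = [0] * (transactionBinCount * listCount)
--     if index > 0:
--         chunk = listCount * index
--         for idx in range(totalElement):
--             slot = (idx // chunk) * listCount + idx % listCount
--             mergeArray[slot] += arrayList[idx]
--     return mergeArray
-- ===== Notes on version B (the rewrite author's own statement) =====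
-- stated objective: alternative
-- what changed: A builds the merged list by appending a zero and accumulating into the last element inside three nested loops (bin, column, stride); B pre-allocates the whole zero array once and does a single linear scatter pass over arrayList, computing each element's target bin/column slot by division and modulus.
import Mathlib
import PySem

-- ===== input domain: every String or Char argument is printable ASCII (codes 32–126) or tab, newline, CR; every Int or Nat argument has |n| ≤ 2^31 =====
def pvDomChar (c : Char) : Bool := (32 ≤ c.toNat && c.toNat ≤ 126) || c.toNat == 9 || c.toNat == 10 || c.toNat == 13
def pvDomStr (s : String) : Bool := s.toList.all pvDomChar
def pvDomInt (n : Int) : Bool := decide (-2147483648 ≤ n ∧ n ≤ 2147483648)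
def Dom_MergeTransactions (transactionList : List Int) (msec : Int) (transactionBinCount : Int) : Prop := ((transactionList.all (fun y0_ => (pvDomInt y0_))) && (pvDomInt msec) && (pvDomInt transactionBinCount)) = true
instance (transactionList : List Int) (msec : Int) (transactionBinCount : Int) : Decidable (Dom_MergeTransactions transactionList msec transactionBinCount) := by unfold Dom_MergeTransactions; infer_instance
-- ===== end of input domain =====

-- B replaces A's three nested loops (append a zero, then accumulate into the last element)
-- by one pre-allocated zero array and a single linear scatter pass over arrayList;
-- objective: simpler/alternative decomposition, same O(totalElement) work.
-- Note: pyGetD/pySetD defaults below are never hit — every Python index access in A and B is in range.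

def smallestTime : Int := 500
def startTime : Int := 0
def listCount : Int := 4

-- ===== PORT A =====
def MergeTransactions (transactionList : List Int) (msec : Int) (transactionBinCount : Int) : List Int :=
  let index := PySem.Int.floordiv (msec - startTime) smallestTime
  let totalElement := index * transactionBinCount * listCount
  if totalElement ≥ PySem.List.len transactionList then []
  else
    let arrayList := PySem.List.slice transactionList (some (-totalElement)) none
    let mergeArray : List Int := []
    (PySem.List.pyRange 0 transactionBinCount).foldl (fun ms i =>
      let curStartIndex := i * listCount * index
      (PySem.List.pyRange 0 listCount).foldl (fun ms2 j =>
        (PySem.List.pyRange 0 index).foldl (fun ms4 k =>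
          PySem.List.pySetD ms4 (-1)
            (PySem.List.pyGetD ms4 (-1) 0 +
             PySem.List.pyGetD arrayList (curStartIndex + j + k * listCount) 0))
          (ms2 ++ [0])) ms) mergeArray

-- ===== PORT B =====
def MergeTransactions_alt (transactionList : List Int) (msec : Int) (transactionBinCount : Int) : List Int :=
  let index := PySem.Int.floordiv (msec - startTime) smallestTime
  let totalElement := index * transactionBinCount * listCount
  if totalElement ≥ PySem.List.len transactionList then []
  else
    let arrayList := PySem.List.slice transactionList (some (-totalElement)) none
    let mergeArray : List Int := List.replicate (transactionBinCount * listCount).toNat 0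
    if 0 < index then
      let chunk := listCount * index
      (PySem.List.pyRange 0 totalElement).foldl (fun ma idx =>
        let slot := PySem.Int.floordiv idx chunk * listCount + PySem.Int.mod idx listCount
        PySem.List.pySetD ma slot
          (PySem.List.pyGetD ma slot 0 + PySem.List.pyGetD arrayList idx 0)) mergeArray
    else mergeArray

-- ===== PRECONDITION & SPEC =====
def Spec_MergeTransactions (transactionList : List Int) (msec : Int) (transactionBinCount : Int) (out : List Int) : Prop := out = MergeTransactions_alt transactionList msec transactionBinCount
instance (transactionList : List Int) (msec : Int) (transactionBinCount : Int) (out : List Int) : Decidable (Spec_MergeTransactions transactionList msec transactionBinCount out) := by unfold Spec_MergeTransactions; infer_instance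

-- ===== CLAIM (what is proved, stated in full; the proofs are below) =====
def Claim_equal_MergeTransactions : Prop := ∀ (transactionList : List Int) (msec : Int) (transactionBinCount : Int), Dom_MergeTransactions transactionList msec transactionBinCount → Spec_MergeTransactions transactionList msec transactionBinCount (MergeTransactions transactionList msec transactionBinCount)

-- ===== LEMMAS AND PROOFS =====

-- the common normal form: n bins of 4 entries, entry (i,j) sums m strided elements
def rowSum (arr : List Int) (m base j : Nat) : Int :=
  ((List.range m).map (fun k => arr.getD (base + j + 4 * k) 0)).sum

def blocks (arr : List Int) (m n : Nat) : List Int :=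
  (List.range n).flatMap (fun i => (List.range 4).map (fun j => rowSum arr m (i * (4 * m)) j))

def slotN (m id : Nat) : Nat := id / (4 * m) * 4 + id % 4

def stepN (arr : List Int) (m : Nat) (ma : List Int) (id : Nat) : List Int :=
  ma.set (slotN m id) (ma.getD (slotN m id) 0 + arr.getD id 0)

theorem pySetD_last (xs : List Int) (x v : Int) : PySem.List.pySetD (xs ++ [x]) (-1) v = xs ++ [v] := by
  simp [PySem.List.pySetD, PySem.List.pySet?, PySem.List.pyIdx?]

theorem innerA (g : Nat → Int) : ∀ (m : Nat) (ms : List Int) (c : Int),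
    (List.range m).foldl (fun ms4 k =>
      PySem.List.pySetD ms4 (-1) (PySem.List.pyGetD ms4 (-1) 0 + g k)) (ms ++ [c])
    = ms ++ [c + ((List.range m).map g).sum] := by
  intro m
  induction m with
  | zero => simp
  | succ m ih =>
    intro ms c
    rw [List.range_succ, List.foldl_append, ih]
    simp only [List.foldl_cons, List.foldl_nil, PySem.List.pyGetD_neg_one_append_singleton,
      pySetD_last, List.map_append, List.sum_append, List.map_cons, List.sum_cons]
    simp [add_assoc]

theorem rowSum_succ (arr : List Int) (m base j : Nat) :
    rowSum arr (m + 1) base j = rowSum arr m base j + arr.getD (base + j + 4 * m) 0 := by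
  simp [rowSum, List.range_succ]

theorem rowSum_zero (arr : List Int) (base j : Nat) : rowSum arr 0 base j = 0 := by
  simp [rowSum]

theorem length_blocks (arr : List Int) (m n : Nat) : (blocks arr m n).length = 4 * n := by
  induction n with
  | zero => simp [blocks]
  | succ n ih => simp only [blocks, List.range_succ, List.flatMap_append] at *; simp; ring

theorem blocks_zero (arr : List Int) (n : Nat) : blocks arr 0 n = List.replicate (4 * n) 0 := by
  induction n with
  | zero => simp [blocks]
  | succ n ih =>
    simp only [blocks, List.range_succ, List.flatMap_append] at *
    rw [ih, show 4 * (n+1) = 4*n + 4 from by ring, List.replicate_add]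
    simp [rowSum_zero]


theorem scatter_left (arr : List Int) (m : Nat) (idxs : List Nat) :
    ∀ (L R : List Int), (∀ id ∈ idxs, slotN m id < L.length) →
    List.foldl (stepN arr m) (L ++ R) idxs = List.foldl (stepN arr m) L idxs ++ R := by
  induction idxs with
  | nil => intro L R _; simp
  | cons a idxs ih =>
    intro L R hb
    have ha : slotN m a < L.length := hb a (by simp)
    have hstep : stepN arr m (L ++ R) a = stepN arr m L a ++ R := by
      unfold stepN
      rw [List.set_append, if_pos ha, List.getD_append _ _ _ _ ha]
    rw [List.foldl_cons, List.foldl_cons, hstep, ih]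
    intro id hid
    rw [stepN, List.length_set]
    exact hb id (by simp [hid])

theorem step_at (arr : List Int) (m n m' x : Nat) (hm' : m' < m) (hx : x < 4)
    (L : List Int) (hL : L.length = 4 * n) (v : List Int) :
    stepN arr m (L ++ v) (4 * m * n + (4 * m' + x))
    = L ++ v.set x (v.getD x 0 + arr.getD (4 * m * n + (4 * m' + x)) 0) := by
  have hdiv : (4 * m * n + (4 * m' + x)) / (4 * m) = n := by
    rw [show 4 * m * n + (4 * m' + x) = (4 * m' + x) + (4 * m) * n from by ring,
      Nat.add_mul_div_left _ _ (by omega), Nat.div_eq_of_lt (by omega)]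
    omega
  have hmod : (4 * m * n + (4 * m' + x)) % 4 = x := by
    rw [show 4 * m * n + (4 * m' + x) = x + 4 * (m * n + m') from by ring,
      Nat.add_mul_mod_self_left, Nat.mod_eq_of_lt hx]
  have hslot : slotN m (4 * m * n + (4 * m' + x)) = n * 4 + x := by
    rw [slotN, hdiv, hmod]
  rw [stepN, hslot, List.set_append, if_neg (by omega),
    List.getD_append_right _ _ _ _ (by omega), show n * 4 + x - L.length = x from by omega]

theorem set4_0 (w x y z v : Int) : ([w,x,y,z].set 0 ([w,x,y,z].getD 0 0 + v)) = [w+v,x,y,z] := rfl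
theorem set4_1 (w x y z v : Int) : ([w,x,y,z].set 1 ([w,x,y,z].getD 1 0 + v)) = [w,x+v,y,z] := rfl
theorem set4_2 (w x y z v : Int) : ([w,x,y,z].set 2 ([w,x,y,z].getD 2 0 + v)) = [w,x,y+v,z] := rfl
theorem set4_3 (w x y z v : Int) : ([w,x,y,z].set 3 ([w,x,y,z].getD 3 0 + v)) = [w,x,y,z+v] := rfl

theorem scatter_row (arr : List Int) (m n : Nat) :
    ∀ (m' : Nat), m' ≤ m → ∀ (L : List Int), L.length = 4 * n → ∀ (a b c d : Int),
    List.foldl (stepN arr m) (L ++ [a, b, c, d]) ((List.range (4 * m')).map (fun t => 4 * m * n + t))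
    = L ++ [a + rowSum arr m' (n * (4 * m)) 0, b + rowSum arr m' (n * (4 * m)) 1,
            c + rowSum arr m' (n * (4 * m)) 2, d + rowSum arr m' (n * (4 * m)) 3] := by
  intro m'
  induction m' with
  | zero => intro _ L hL a b c d; simp [rowSum_zero]
  | succ m' ih =>
    intro hm' L hL a b c d
    rw [show 4 * (m' + 1) = 4 * m' + 4 from by ring, List.range_add, List.map_append,
      List.foldl_append, ih (by omega) L hL]
    rw [show List.range 4 = [0, 1, 2, 3] from rfl]
    simp only [List.map_cons, List.map_nil, List.foldl_cons, List.foldl_nil]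
    rw [step_at arr m n m' 0 (by omega) (by omega) L hL, set4_0,
      step_at arr m n m' 1 (by omega) (by omega) L hL, set4_1,
      step_at arr m n m' 2 (by omega) (by omega) L hL, set4_2,
      step_at arr m n m' 3 (by omega) (by omega) L hL, set4_3]
    rw [rowSum_succ, rowSum_succ, rowSum_succ, rowSum_succ]
    have e : ∀ j : Nat, 4 * m * n + (4 * m' + j) = n * (4 * m) + j + 4 * m' := by intro j; ring
    rw [e 0, e 1, e 2, e 3]
    simp [add_assoc]

theorem scatter (arr : List Int) (m : Nat) (hm : 0 < m) :
    ∀ n, List.foldl (stepN arr m) (List.replicate (4 * n) 0) (List.range (4 * m * n))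
      = blocks arr m n := by
  intro n
  induction n with
  | zero => simp [blocks]
  | succ n ih =>
    rw [show 4 * m * (n + 1) = 4 * m * n + 4 * m from by ring, List.range_add,
      show 4 * (n + 1) = 4 * n + 4 from by ring, List.replicate_add,
      show (List.replicate 4 (0:Int)) = [0,0,0,0] from rfl, List.foldl_append,
      scatter_left arr m _ _ _ ?bound, ih,
      scatter_row arr m n m le_rfl _ (length_blocks arr m n) 0 0 0 0]
    · simp only [blocks, List.range_succ, List.flatMap_append, List.flatMap_cons, List.flatMap_nil,
        List.append_nil]
      congr 1
      simp
    case bound =>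
      intro id hid
      rw [List.mem_range] at hid
      have hdl : id / (4 * m) < n := by
        rw [Nat.div_lt_iff_lt_mul (by omega), Nat.mul_comm n (4 * m)]
        omega
      have hml : id % 4 < 4 := Nat.mod_lt _ (by omega)
      rw [List.length_replicate, slotN]
      omega

theorem A_norm (arr : List Int) (q bc : Int) :
    (PySem.List.pyRange 0 bc).foldl (fun ms i =>
      (PySem.List.pyRange 0 listCount).foldl (fun ms2 j =>
        (PySem.List.pyRange 0 q).foldl (fun ms4 k =>
          PySem.List.pySetD ms4 (-1)
            (PySem.List.pyGetD ms4 (-1) 0 +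
             PySem.List.pyGetD arr (i * listCount * q + j + k * listCount) 0))
          (ms2 ++ [0])) ms) []
    = blocks arr q.toNat bc.toNat := by
  simp only [listCount]
  rw [PySem.List.pyRange_zero bc, List.foldl_map]
  have hval : ∀ (i j : Nat),
      (0:Int) + ((List.range q.toNat).map
        (fun (k : Nat) => PySem.List.pyGetD arr ((i:Int) * 4 * q + (j:Int) + (k:Int) * 4) 0)).sum
      = rowSum arr q.toNat (i * (4 * q.toNat)) j := by
    intro i j
    rcases Int.lt_or_le q 0 with hq | hq
    case inl =>
      rw [Int.toNat_of_nonpos hq.le]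
      simp [rowSum]
    case inr =>
      rw [zero_add, rowSum]
      congr 1
      apply List.map_congr_left
      intro k _
      rw [show ((i:Int) * 4 * q + (j:Int) + (k:Int) * 4) = ((i * (4 * q.toNat) + j + 4 * k : Nat) : Int) from by
        push_cast [Int.toNat_of_nonneg hq]; ring]
      rw [PySem.List.pyGetD_natCast]
  have hmid : ∀ (ms : List Int) (i : Nat),
      (PySem.List.pyRange 0 4).foldl (fun ms2 j =>
        (PySem.List.pyRange 0 q).foldl (fun ms4 k =>
          PySem.List.pySetD ms4 (-1)
            (PySem.List.pyGetD ms4 (-1) 0 +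
             PySem.List.pyGetD arr ((i:Int) * 4 * q + j + k * 4) 0))
          (ms2 ++ [0])) ms
      = ms ++ (List.range 4).map (fun j => rowSum arr q.toNat (i * (4 * q.toNat)) j) := by
    intro ms i
    rw [PySem.List.pyRange_zero 4, List.foldl_map]
    have hinner : ∀ (ms2 : List Int) (j : Nat),
        (PySem.List.pyRange 0 q).foldl (fun ms4 k =>
          PySem.List.pySetD ms4 (-1)
            (PySem.List.pyGetD ms4 (-1) 0 +
             PySem.List.pyGetD arr ((i:Int) * 4 * q + (j:Int) + k * 4) 0))
          (ms2 ++ [0])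
        = ms2 ++ [rowSum arr q.toNat (i * (4 * q.toNat)) j] := by
      intro ms2 j
      rw [PySem.List.pyRange_zero q, List.foldl_map, innerA, hval]
    simp only [hinner]
    rw [PySem.List.foldl_append_singleton_eq_map]
    congr 1
  simp only [hmid]
  rw [PySem.List.foldl_append_eq_flatMap]
  simp [blocks]

theorem B_norm (arr : List Int) (q bc : Int) :
    (if 0 < q then
      (PySem.List.pyRange 0 (q * bc * listCount)).foldl (fun ma idx =>
        PySem.List.pySetD ma (PySem.Int.floordiv idx (listCount * q) * listCount + PySem.Int.mod idx listCount)
          (PySem.List.pyGetD ma (PySem.Int.floordiv idx (listCount * q) * listCount + PySem.Int.mod idx listCount) 0 +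
           PySem.List.pyGetD arr idx 0)) (List.replicate (bc * listCount).toNat 0)
    else List.replicate (bc * listCount).toNat 0)
    = blocks arr q.toNat bc.toNat := by
  simp only [listCount]
  rcases Int.lt_or_le 0 q with hq | hq
  case inr =>
    rw [if_neg (by omega), show q.toNat = 0 from by omega, blocks_zero,
      show (bc * 4).toNat = 4 * bc.toNat from by omega]
  case inl =>
    rw [if_pos hq]
    rcases Int.lt_or_le bc 0 with hbc | hbc
    · have h1 : q * bc < 0 := mul_neg_of_pos_of_neg hq hbc
      rw [PySem.List.pyRange_zero, show (q * bc * 4).toNat = 0 from by omega,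
        show bc.toNat = 0 from by omega, show (bc * 4).toNat = 0 from by omega]
      simp [blocks]
    · have hqe : q = (q.toNat : Int) := (Int.toNat_of_nonneg hq.le).symm
      have hbe : bc = (bc.toNat : Int) := (Int.toNat_of_nonneg hbc).symm
      have hm : 0 < q.toNat := by omega
      rw [show q * bc * 4 = ((4 * q.toNat * bc.toNat : Nat) : Int) from by
            rw [hqe, hbe]; push_cast [Int.toNat_natCast]; ring,
        PySem.List.pyRange_zero, Int.toNat_natCast, List.foldl_map,
        show (bc * 4).toNat = 4 * bc.toNat from by omega]
      have hbody : (fun (ma : List Int) (id : Nat) =>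
          PySem.List.pySetD ma (PySem.Int.floordiv (id : Int) (4 * q) * 4 + PySem.Int.mod (id : Int) 4)
            (PySem.List.pyGetD ma (PySem.Int.floordiv (id : Int) (4 * q) * 4 + PySem.Int.mod (id : Int) 4) 0 +
             PySem.List.pyGetD arr (id : Int) 0))
          = stepN arr q.toNat := by
        funext ma id
        have hsl : PySem.Int.floordiv (id : Int) (4 * q) * 4 + PySem.Int.mod (id : Int) 4
            = ((slotN q.toNat id : Nat) : Int) := by
          rw [show (4 * q : Int) = ((4 * q.toNat : Nat) : Int) from by rw [hqe]; push_cast [Int.toNat_natCast]; ring,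
            PySem.Int.floordiv_natCast, show (4 : Int) = ((4 : Nat) : Int) from by norm_num,
            PySem.Int.mod_natCast, slotN]
          push_cast
          ring
        rw [hsl, PySem.List.pySetD_natCast, PySem.List.pyGetD_natCast, PySem.List.pyGetD_natCast,
          stepN]
      rw [hbody, scatter arr q.toNat hm bc.toNat]

-- ===== VERDICT (by name: the statement is the Claim_ definition above) =====
theorem MergeTransactions_spec : Claim_equal_MergeTransactions := by
  intro tl msec bc _
  unfold Spec_MergeTransactions MergeTransactions MergeTransactions_alt
  dsimp only
  by_cases h : PySem.Int.floordiv (msec - startTime) smallestTime * bc * listCount ≥ PySem.List.len tl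
  · rw [if_pos h, if_pos h]
  · rw [if_neg h, if_neg h]
    exact (A_norm _ _ _).trans (B_norm _ _ _).symm
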